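-- pv_equiv track=rewrite | github.com/ShanesNotes/orthodoxphronema | pipeline/tools/restructure_job.py | rebuild_file
-- ===== SOURCE A (Python) =====
-- def rebuild_file(fm_lines, ch12_verses, reassigned):
--     """Rebuild JOB.md with correct chapter structure."""
--     out = list(fm_lines)
--
--     # Group ch1-2 by chapter
--     for ch_num in [1, 2]:
--         out.append("")
--         out.append(f"## Chapter {ch_num}")
--         out.append("")
--         for orig_ch, orig_v, text, line, hdgs in ch12_verses:
--             if orig_ch == ch_num:
--                 for h in hdgs:
--                     out.append("")
--                     out.append(h)
--                     out.append("")
--                 out.append(line)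
--
--     # Sort reassigned by (new_ch, new_v)
--     reassigned.sort(key=lambda x: (x[0], x[1]))
--
--     current_ch = 2
--     for new_ch, new_v, text, orig_line, hdgs, score in reassigned:
--         if new_ch != current_ch:
--             current_ch = new_ch
--             out.append(f"## Chapter {current_ch}")
--             out.append("")
--
--         for h in hdgs:
--             out.append("")
--             out.append(h)
--             out.append("")
--
--         # Build new line with corrected anchor
--         new_line = f"JOB.{new_ch}:{new_v} {text}"
--         out.append(new_line)
--
--     return "\n".join(out) + "\n"
-- ===== SOURCE B (Python) =====
-- def _hblock(hdgs):
--     return "".join("\n%s\n\n" % h for h in hdgs)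
--
--
-- def rebuild_file(fm_lines, ch12_verses, reassigned):
--     """Rebuild JOB.md by concatenating per-item text chunks directly (no line list)."""
--     reassigned.sort(key=lambda x: (x[0], x[1]))
--
--     # One pass over ch12_verses: accumulate each chapter's body text directly.
--     body1 = body2 = ""
--     for ch, _v, _t, line, hdgs in ch12_verses:
--         if ch == 1:
--             body1 += _hblock(hdgs) + line + "\n"
--         elif ch == 2:
--             body2 += _hblock(hdgs) + line + "\n"
--
--     parts = ["".join(l + "\n" for l in fm_lines),
--              "\n## Chapter 1\n\n" + body1,
--              "\n## Chapter 2\n\n" + body2]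
--
--     prev = 2
--     for new_ch, new_v, text, _orig, hdgs, _score in reassigned:
--         head = "" if new_ch == prev else "## Chapter %d\n\n" % new_ch
--         parts.append(head + _hblock(hdgs) + "JOB.%d:%d %s\n" % (new_ch, new_v, text))
--         prev = new_ch
--     return "".join(parts)
-- ===== Notes on version B (the rewrite author's own statement) =====
-- stated objective: alternative
-- what changed: B never builds A's list of output lines: it concatenates the document text directly from per-item string chunks - one pass over ch12_verses accumulating the two chapter bodies as strings, then a parts list of per-verse chunk strings joined once with no separator - instead of A's per-chapter rescans appending lines and a final newline-join.
import Mathlib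
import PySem

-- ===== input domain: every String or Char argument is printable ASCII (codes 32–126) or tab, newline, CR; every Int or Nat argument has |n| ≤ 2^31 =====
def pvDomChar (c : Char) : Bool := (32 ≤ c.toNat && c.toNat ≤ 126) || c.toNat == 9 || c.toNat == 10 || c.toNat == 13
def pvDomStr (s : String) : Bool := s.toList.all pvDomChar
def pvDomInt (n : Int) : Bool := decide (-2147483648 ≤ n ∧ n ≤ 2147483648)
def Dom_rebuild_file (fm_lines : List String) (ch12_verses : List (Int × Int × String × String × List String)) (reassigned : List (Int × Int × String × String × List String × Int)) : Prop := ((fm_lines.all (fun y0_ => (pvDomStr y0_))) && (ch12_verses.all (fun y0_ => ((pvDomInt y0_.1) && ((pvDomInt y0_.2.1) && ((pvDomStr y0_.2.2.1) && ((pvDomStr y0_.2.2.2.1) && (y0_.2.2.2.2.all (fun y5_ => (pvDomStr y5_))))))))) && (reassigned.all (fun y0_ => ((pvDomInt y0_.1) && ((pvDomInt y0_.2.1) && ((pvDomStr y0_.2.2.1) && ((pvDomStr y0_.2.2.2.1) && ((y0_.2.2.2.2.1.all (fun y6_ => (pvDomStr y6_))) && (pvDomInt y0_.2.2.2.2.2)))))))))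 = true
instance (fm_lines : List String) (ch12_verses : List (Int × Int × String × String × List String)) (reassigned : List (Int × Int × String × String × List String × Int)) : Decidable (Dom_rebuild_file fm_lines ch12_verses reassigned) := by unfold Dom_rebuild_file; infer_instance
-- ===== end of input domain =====

-- B builds the document text directly by concatenating per-item chunks (one pass over
-- ch12_verses with two chapter-body accumulators, then "".join of per-verse part strings)
-- instead of A's line list with per-chapter rescans joined by "\n"; equal return value
-- is what is proved (both A and B sort `reassigned` in place).

-- ===== PORT A =====
def rebuild_file (fm_lines : List String) (ch12_verses : List (Int × Int × String × String × List String)) (reassigned : List (Int × Int × String × String × List String × Int)) : String :=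
  -- out = list(fm_lines); for ch_num in [1, 2]: …
  let out := ([1, 2] : List Int).foldl (fun out ch_num =>
    let out := out ++ ["", "## Chapter " ++ PySem.Int.toStr ch_num, ""]
    ch12_verses.foldl (fun out v =>
      if v.1 = ch_num then
        (v.2.2.2.2.foldl (fun out h => out ++ ["", h, ""]) out) ++ [v.2.2.2.1]
      else out) out) fm_lines
  -- reassigned.sort(key=lambda x: (x[0], x[1]))
  let rs := PySem.List.sorted2 reassigned (fun x => x.1) (fun x => x.2.1)
  -- current_ch = 2; for … in reassigned: …  (out, current_ch tracked as a pair)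
  let st := rs.foldl (fun (p : List String × Int) v =>
    let q :=
      if v.1 ≠ p.2 then (p.1 ++ ["## Chapter " ++ PySem.Int.toStr v.1, ""], v.1)
      else (p.1, p.2)
    (v.2.2.2.2.1.foldl (fun out h => out ++ ["", h, ""]) q.1 ++
      ["JOB." ++ PySem.Int.toStr v.1 ++ ":" ++ PySem.Int.toStr v.2.1 ++ " " ++ v.2.2.1], q.2))
    (out, (2 : Int))
  PySem.Str.join "\n" st.1 ++ "\n"

-- ===== PORT B =====
-- _hblock(hdgs) = "".join("\n%s\n\n" % h for h in hdgs)
def pvHblock (hdgs : List String) : String :=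
  PySem.Str.join "" (hdgs.map (fun h => "\n" ++ h ++ "\n\n"))

def rebuild_file_alt (fm_lines : List String) (ch12_verses : List (Int × Int × String × String × List String)) (reassigned : List (Int × Int × String × String × List String × Int)) : String :=
  let rs := PySem.List.sorted2 reassigned (fun x => x.1) (fun x => x.2.1)
  -- body1 = body2 = ""; one pass over ch12_verses accumulating chapter body text
  let bodies := ch12_verses.foldl (fun (p : String × String) v =>
      if v.1 = 1 then (p.1 ++ (pvHblock v.2.2.2.2 ++ v.2.2.2.1 ++ "\n"), p.2)
      else if v.1 = 2 then (p.1, p.2 ++ (pvHblock v.2.2.2.2 ++ v.2.2.2.1 ++ "\n"))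
      else p) ("", "")
  let parts := [PySem.Str.join "" (fm_lines.map (fun l => l ++ "\n")),
                "\n## Chapter 1\n\n" ++ bodies.1,
                "\n## Chapter 2\n\n" ++ bodies.2]
  -- prev = 2; for … in reassigned: parts.append(head + _hblock(hdgs) + "JOB.…\n")
  let st := rs.foldl (fun (q : List String × Int) v =>
      let head := if v.1 = q.2 then "" else "## Chapter " ++ PySem.Int.toStr v.1 ++ "\n\n"
      (q.1 ++ [head ++ (pvHblock v.2.2.2.2.1 ++
        ("JOB." ++ PySem.Int.toStr v.1 ++ ":" ++ PySem.Int.toStr v.2.1 ++ " " ++ v.2.2.1 ++ "\n"))], v.1))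
      (parts, (2 : Int))
  PySem.Str.join "" st.1

-- ===== PRECONDITION & SPEC =====
def Spec_rebuild_file (fm_lines : List String) (ch12_verses : List (Int × Int × String × String × List String)) (reassigned : List (Int × Int × String × String × List String × Int)) (out : String) : Prop := out = rebuild_file_alt fm_lines ch12_verses reassigned
instance (fm_lines : List String) (ch12_verses : List (Int × Int × String × String × List String)) (reassigned : List (Int × Int × String × String × List String × Int)) (out : String) : Decidable (Spec_rebuild_file fm_lines ch12_verses reassigned out) := by unfold Spec_rebuild_file; infer_instance

-- ===== CLAIM (what is proved, stated in full; the proofs are below) =====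
def Claim_equal_rebuild_file : Prop := ∀ (fm_lines : List String) (ch12_verses : List (Int × Int × String × String × List String)) (reassigned : List (Int × Int × String × String × List String × Int)), Dom_rebuild_file fm_lines ch12_verses reassigned → Spec_rebuild_file fm_lines ch12_verses reassigned (rebuild_file fm_lines ch12_verses reassigned)

-- ===== LEMMAS AND PROOFS =====

-- the lines A appends for one heading list / one chapter / the reassigned tail
def pvExpand (hdgs : List String) : List String := hdgs.flatMap (fun h => ["", h, ""])

def pvChLines (ch : Int) (l : List (Int × Int × String × String × List String)) : List String :=
  l.flatMap (fun v => if v.1 = ch then pvExpand v.2.2.2.2 ++ [v.2.2.2.1] else [])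

def pvTailLines : List (Int × Int × String × String × List String × Int) → Int → List String
  | [], _ => []
  | v :: t, prev =>
      (if v.1 = prev then [] else ["## Chapter " ++ PySem.Int.toStr v.1, ""]) ++
      pvExpand v.2.2.2.2.1 ++
      ["JOB." ++ PySem.Int.toStr v.1 ++ ":" ++ PySem.Int.toStr v.2.1 ++ " " ++ v.2.2.1] ++
      pvTailLines t v.1

-- the character stream of a line list: each line followed by '\n'
def pvLC (l : List String) : List Char := (l.map (fun s => s.toList ++ ['\n'])).flatten

theorem pvLC_append (x y : List String) : pvLC (x ++ y) = pvLC x ++ pvLC y := by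
  simp [pvLC]

-- A side: the chapter fold appends pvChLines
theorem pv_A_ch (l : List (Int × Int × String × String × List String)) (ch : Int) :
    ∀ out : List String,
    l.foldl (fun out v =>
      if v.1 = ch then
        (v.2.2.2.2.foldl (fun out h => out ++ ["", h, ""]) out) ++ [v.2.2.2.1]
      else out) out = out ++ pvChLines ch l := by
  induction l with
  | nil => intro out; simp [pvChLines]
  | cons v t ih =>
    intro out
    simp only [List.foldl_cons, pvChLines, List.flatMap_cons, ih]
    by_cases h : v.1 = ch
    · rw [if_pos h, if_pos h, PySem.List.foldl_append_eq_flatMap]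
      simp [pvExpand, List.append_assoc]
    · rw [if_neg h, if_neg h]
      simp

-- A side: the reassigned fold appends pvTailLines
theorem pv_A_tail (rs : List (Int × Int × String × String × List String × Int)) :
    ∀ p : List String × Int,
    (rs.foldl (fun (p : List String × Int) v =>
      let q :=
        if v.1 ≠ p.2 then (p.1 ++ ["## Chapter " ++ PySem.Int.toStr v.1, ""], v.1)
        else (p.1, p.2)
      (v.2.2.2.2.1.foldl (fun out h => out ++ ["", h, ""]) q.1 ++
        ["JOB." ++ PySem.Int.toStr v.1 ++ ":" ++ PySem.Int.toStr v.2.1 ++ " " ++ v.2.2.1], q.2))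
      p).1 = p.1 ++ pvTailLines rs p.2 := by
  induction rs with
  | nil => intro p; simp [pvTailLines]
  | cons v t ih =>
    intro p
    simp only [List.foldl_cons, pvTailLines]
    by_cases h : v.1 = p.2
    · rw [if_neg (by simp [h]), if_pos h, ih, PySem.List.foldl_append_eq_flatMap, h]
      simp [pvExpand, List.append_assoc]
    · rw [if_pos (by simp [h]), if_neg h, ih, PySem.List.foldl_append_eq_flatMap]
      simp [pvExpand, List.append_assoc]

-- "".join over a cons (char level)
theorem pv_join_nil_cons (p : List Char) (ps : List (List Char)) :
    PySem.Chars.join [] (p :: ps) = p ++ PySem.Chars.join [] ps := by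
  cases ps with
  | nil => simp [PySem.Chars.join_singleton, PySem.Chars.join_nil]
  | cons q r => rw [PySem.Chars.join_cons_cons]; simp

theorem pv_join_empty (parts : List String) :
    (PySem.Str.join "" parts).toList = (parts.map String.toList).flatten := by
  induction parts with
  | nil => simp [PySem.Str.toList_join, PySem.Chars.join_nil]
  | cons a t ih =>
    rw [PySem.Str.toList_join] at *
    simp only [List.map_cons]
    rw [show ("" : String).toList = [] from rfl] at *
    rw [pv_join_nil_cons, ih, List.flatten_cons]

-- "\n".join(out) + "\n" is the character stream pvLC out (out nonempty)
theorem pv_join_nl (l : List String) (h : l ≠ []) :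
    (PySem.Str.join "\n" l ++ "\n").toList = pvLC l := by
  induction l with
  | nil => exact absurd rfl h
  | cons a t ih =>
    cases t with
    | nil =>
      simp [String.toList_append, PySem.Str.toList_join, PySem.Chars.join_singleton, pvLC]
    | cons b r =>
      have : (PySem.Str.join "\n" (a :: b :: r)).toList =
          a.toList ++ ['\n'] ++ (PySem.Str.join "\n" (b :: r)).toList := by
        simp [PySem.Str.toList_join, PySem.Chars.join_cons_cons]
      rw [String.toList_append, this, pvLC, List.map_cons, List.flatten_cons]
      have ht := ih (by simp)
      rw [String.toList_append] at ht
      simp only [List.append_assoc]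
      rw [ht]
      rfl

-- a heading block chunk is the character stream of its lines
theorem pv_hblock (hdgs : List String) : (pvHblock hdgs).toList = pvLC (pvExpand hdgs) := by
  induction hdgs with
  | nil => simp [pvHblock, pvExpand, pvLC]
  | cons h t ih =>
    simp only [pvHblock, List.map_cons, pv_join_empty, List.flatten_cons] at *
    rw [ih]
    simp [pvExpand, pvLC, String.toList_append]

theorem pv_chunk (hdgs : List String) (line : String) :
    (pvHblock hdgs ++ line ++ "\n").toList = pvLC (pvExpand hdgs ++ [line]) := by
  rw [pvLC_append, ← pv_hblock]
  simp [String.toList_append, pvLC]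

-- B side: the one-pass body fold yields the character streams of A's two chapter line lists
theorem pv_B_bodies (l : List (Int × Int × String × String × List String)) :
    ∀ p : String × String,
    (((l.foldl (fun (p : String × String) v =>
      if v.1 = 1 then (p.1 ++ (pvHblock v.2.2.2.2 ++ v.2.2.2.1 ++ "\n"), p.2)
      else if v.1 = 2 then (p.1, p.2 ++ (pvHblock v.2.2.2.2 ++ v.2.2.2.1 ++ "\n"))
      else p) p).1).toList = p.1.toList ++ pvLC (pvChLines 1 l)) ∧
    (((l.foldl (fun (p : String × String) v =>
      if v.1 = 1 then (p.1 ++ (pvHblock v.2.2.2.2 ++ v.2.2.2.1 ++ "\n"), p.2)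
      else if v.1 = 2 then (p.1, p.2 ++ (pvHblock v.2.2.2.2 ++ v.2.2.2.1 ++ "\n"))
      else p) p).2).toList = p.2.toList ++ pvLC (pvChLines 2 l)) := by
  induction l with
  | nil => intro p; simp [pvChLines, pvLC]
  | cons v t ih =>
    intro p
    simp only [List.foldl_cons, pvChLines, List.flatMap_cons]
    by_cases h1 : v.1 = 1
    · have h2 : ¬ v.1 = 2 := by rw [h1]; decide
      simp only [if_pos h1, if_neg h2]
      refine ⟨((ih _).1).trans ?_, ((ih _).2).trans ?_⟩
      · rw [String.toList_append, pv_chunk, pvLC_append]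
        simp [pvChLines, pvLC, List.append_assoc]
      · simp [pvChLines]
    · by_cases h2 : v.1 = 2
      · simp only [if_neg h1, if_pos h2]
        refine ⟨((ih _).1).trans ?_, ((ih _).2).trans ?_⟩
        · simp [pvChLines]
        · rw [String.toList_append, pv_chunk, pvLC_append]
          simp [pvChLines, pvLC, List.append_assoc]
      · simp only [if_neg h1, if_neg h2]
        refine ⟨((ih _).1).trans ?_, ((ih _).2).trans ?_⟩ <;> simp [pvChLines]

-- B side: the reassigned loop's appended part strings stream to pvTailLines
theorem pv_B_tail (rs : List (Int × Int × String × String × List String × Int)) :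
    ∀ q : List String × Int,
    (((rs.foldl (fun (q : List String × Int) v =>
      let head := if v.1 = q.2 then "" else "## Chapter " ++ PySem.Int.toStr v.1 ++ "\n\n"
      (q.1 ++ [head ++ (pvHblock v.2.2.2.2.1 ++
        ("JOB." ++ PySem.Int.toStr v.1 ++ ":" ++ PySem.Int.toStr v.2.1 ++ " " ++ v.2.2.1 ++ "\n"))], v.1))
      q).1.map String.toList).flatten) =
    (q.1.map String.toList).flatten ++ pvLC (pvTailLines rs q.2) := by
  induction rs with
  | nil => intro q; simp [pvTailLines, pvLC]
  | cons v t ih =>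
    intro q
    simp only [List.foldl_cons, pvTailLines]
    rw [ih]
    simp only [List.map_append, List.flatten_append, List.map_cons, List.map_nil,
      List.flatten_cons, List.flatten_nil, List.append_nil, List.append_assoc]
    congr 1
    rw [pvLC_append, pvLC_append]
    by_cases h : v.1 = q.2
    · rw [if_pos h, if_pos h]
      simp [pvLC, String.toList_append, pv_hblock, List.append_assoc]
    · rw [if_neg h, if_neg h]
      simp [pvLC, String.toList_append, pv_hblock, List.append_assoc]

-- ===== VERDICT (by name: the statement is the Claim_ definition above) =====
theorem rebuild_file_spec : Claim_equal_rebuild_file := by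
  intro fm l rs _
  unfold Spec_rebuild_file rebuild_file rebuild_file_alt
  apply String.ext
  simp only [List.foldl_cons, List.foldl_nil, pv_A_ch, pv_A_tail]
  rw [pv_join_nl _ (by simp), pv_join_empty, pv_B_tail]
  rw [List.map_cons, List.map_cons, List.map_cons, List.map_nil, List.flatten_cons,
    List.flatten_cons, List.flatten_cons, List.flatten_nil, List.append_nil]
  rw [String.toList_append, String.toList_append, (pv_B_bodies l _).1, (pv_B_bodies l _).2,
    pv_join_empty]
  rw [show ("\n## Chapter 1\n\n" : String) = "\n" ++ ("## Chapter " ++ PySem.Int.toStr 1) ++ ("\n" ++ "\n") from rfl,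
    show ("\n## Chapter 2\n\n" : String) = "\n" ++ ("## Chapter " ++ PySem.Int.toStr 2) ++ ("\n" ++ "\n") from rfl]
  simp only [pvLC, List.map_append, List.map_cons, List.map_nil, List.map_map,
    List.flatten_append, List.flatten_cons, List.flatten_nil, String.toList_append,
    Function.comp_def, show ("\n" : String).toList = ['\n'] from rfl,
    show ("" : String).toList = [] from rfl,
    List.append_nil, List.nil_append, List.append_assoc]
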